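-- pv_equiv track=rewrite | github.com/Valps/gta2-gmp-rotator | flip_cmd.py | get_next_numeric_param
-- ===== SOURCE A (Python) =====
-- def get_next_numeric_param(line):
--     """Get the next parameter as number. It also returns the string position after it.
--
--     If the line has ended after that number, it will return -1 as second return value.
--
--     If there are not numbers until the end of line, the function will return (None, -2). This
--     is the case of optional parameters that doesn't exists.
--     """
--     number_str = ""
--     for i, chr in enumerate(line):
--         if len(number_str) == 0 and chr == '-':
--             number_str += chr
--             continue
--         if not chr.isdigit():
--             if len(number_str) != 0:
--                 return ( int(number_str) , i )
--             continue
--         number_str += chr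
--
--     if number_str:
--         return ( int(number_str) , -1 )  # last param: end of line
--     else:
--         return ( None , -2 )       # optional var doesn't exist
-- ===== SOURCE B (Python) =====
-- def get_next_numeric_param(line):
--     """Two-phase index parser: find the token's start and end, slice once, int() once."""
--     n = len(line)
--     start = 0
--     while start < n and not (line[start] == '-' or line[start].isdigit()):
--         start += 1
--     if start == n:
--         return (None, -2)
--     end = start + 1
--     while end < n and line[end].isdigit():
--         end += 1
--     value = int(line[start:end])
--     if end == n:
--         return (value, -1)
--     return (value, end)
-- ===== Notes on version B (the rewrite author's own statement) =====
-- stated objective: alternative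
-- what changed: A accumulates the numeric token character by character inside a single enumerate loop with a mid-loop early return; B is a two-phase index parser that first finds the token's start index, then its end index, and slices the string once and calls int() once.
import Mathlib
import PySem

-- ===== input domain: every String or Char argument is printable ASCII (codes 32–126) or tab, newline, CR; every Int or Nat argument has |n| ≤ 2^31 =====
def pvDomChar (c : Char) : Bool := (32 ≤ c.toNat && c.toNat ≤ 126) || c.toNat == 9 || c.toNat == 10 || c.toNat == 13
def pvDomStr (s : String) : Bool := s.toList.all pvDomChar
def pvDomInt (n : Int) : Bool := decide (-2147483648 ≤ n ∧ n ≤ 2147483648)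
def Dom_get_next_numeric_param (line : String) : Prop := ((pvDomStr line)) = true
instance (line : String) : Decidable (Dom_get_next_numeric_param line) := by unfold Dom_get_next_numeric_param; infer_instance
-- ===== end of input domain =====

-- B replaces A's char-by-char token accumulation (with its mid-loop early return) by a
-- two-phase index scan (find start, find end) plus one slice and one int() call: an
-- alternative decomposition of the same parse, identical return values.

-- ===== PORT A =====

-- int(number_str) followed by returning the pair; `none` = Python's ValueError
-- (reached only for the token "-", excluded by Pre_; the (none, -3) value is arbitrary there).
def pvIntOf (acc : List Char) (pos : Int) : Option Int × Int :=
  match PySem.Int.ofChars? acc with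
  | some n => (some n, pos)
  | none => (none, -3)

-- the `for i, chr in enumerate(line)` loop with accumulator number_str = acc
def pvALoop : List Char → Int → List Char → Option Int × Int
  | [], _, acc => if acc.isEmpty then (none, -2) else pvIntOf acc (-1)
  | c :: rest, i, acc =>
    if acc.isEmpty && c == '-' then pvALoop rest (i + 1) (acc ++ [c])
    else if !(PySem.Chars.isdigit c) then
      (if !acc.isEmpty then pvIntOf acc i else pvALoop rest (i + 1) acc)
    else pvALoop rest (i + 1) (acc ++ [c])

def get_next_numeric_param (line : String) : Option Int × Int :=
  pvALoop line.toList 0 []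

-- ===== PORT B =====

-- first while loop: advance start while the char is neither '-' nor a digit
def pvFindStart : List Char → Nat → Nat
  | [], k => k
  | c :: rest, k =>
    if c == '-' || PySem.Chars.isdigit c then k else pvFindStart rest (k + 1)

-- second while loop: advance end while the char is a digit
def pvFindEnd : List Char → Nat → Nat
  | [], k => k
  | c :: rest, k => if PySem.Chars.isdigit c then pvFindEnd rest (k + 1) else k

def get_next_numeric_param_alt (line : String) : Option Int × Int :=
  let cs := line.toList
  let n := cs.length
  let start := pvFindStart cs 0
  if start = n then (none, -2)
  else
    let e := pvFindEnd (cs.drop (start + 1)) (start + 1)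
    let token := PySem.List.slice cs (some (start : Int)) (some (e : Int))
    match PySem.Int.ofChars? token with   -- none = Python's ValueError (token "-"), excluded by Pre_
    | some v => if e = n then (some v, -1) else (some v, (e : Int))
    | none => (none, -3)

-- ===== PRECONDITION & SPEC =====
-- Pre_ excludes exactly the inputs on which A raises ValueError (a lone minus token): those
-- whose first minus-or-digit character is a minus not immediately followed by a digit.  B
-- raises the same ValueError there (both ports return the arbitrary (none, -3)).
def Pre_get_next_numeric_param (line : String) : Prop :=
  let t := (line.toList).dropWhile (fun c => !(c == '-' || PySem.Chars.isdigit c))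
  t.head? = some '-' → t.tail.head?.any PySem.Chars.isdigit = true
instance (line : String) : Decidable (Pre_get_next_numeric_param line) := by
  unfold Pre_get_next_numeric_param; infer_instance

def pvWitness_get_next_numeric_param : String := "x -12 y"

def Spec_get_next_numeric_param (line : String) (out : Option Int × Int) : Prop := out = get_next_numeric_param_alt line
instance (line : String) (out : Option Int × Int) : Decidable (Spec_get_next_numeric_param line out) := by unfold Spec_get_next_numeric_param; infer_instance

-- ===== CLAIM (what is proved, stated in full; the proofs are below) =====
def Claim_equal_get_next_numeric_param : Prop := ∀ (line : String), Dom_get_next_numeric_param line → Pre_get_next_numeric_param line → Spec_get_next_numeric_param line (get_next_numeric_param line)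

-- ===== LEMMAS AND PROOFS =====

-- reference form of the result: skip non-start chars, then token = start char + following digits
def pvRef : List Char → Int → Option Int × Int
  | [], _ => (none, -2)
  | c :: rest, i =>
    if c == '-' || PySem.Chars.isdigit c then
      if 1 + (rest.takeWhile PySem.Chars.isdigit).length = (c :: rest).length then
        pvIntOf (c :: rest.takeWhile PySem.Chars.isdigit) (-1)
      else
        pvIntOf (c :: rest.takeWhile PySem.Chars.isdigit)
          (i + (1 + ((rest.takeWhile PySem.Chars.isdigit).length : Int)))
    else pvRef rest (i + 1)

-- A's loop once the accumulator is nonempty: consume digits, return at the first non-digit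
theorem pvALoop_phase2 (rest : List Char) : ∀ (i : Int) (acc : List Char), acc ≠ [] →
    pvALoop rest i acc =
      (if (rest.takeWhile PySem.Chars.isdigit).length = rest.length then
        pvIntOf (acc ++ rest.takeWhile PySem.Chars.isdigit) (-1)
      else
        pvIntOf (acc ++ rest.takeWhile PySem.Chars.isdigit)
          (i + ((rest.takeWhile PySem.Chars.isdigit).length : Int))) := by
  induction rest with
  | nil => intro i acc h; simp [pvALoop, List.isEmpty_iff, h]
  | cons c rest ih =>
    intro i acc h
    obtain ⟨a, as, rfl⟩ := List.exists_cons_of_ne_nil h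
    by_cases hd : PySem.Chars.isdigit c = true
    · rw [pvALoop, if_neg (by simp), if_neg (by simp [hd])]
      rw [ih (i + 1) ((a :: as) ++ [c]) (by simp)]
      simp only [List.takeWhile_cons, hd, if_true, List.length_cons]
      by_cases hlen : (rest.takeWhile PySem.Chars.isdigit).length = rest.length
      · simp [hlen]
      · rw [if_neg hlen, if_neg (by omega)]
        simp only [List.append_assoc, List.singleton_append]
        congr 1
        push_cast; ring
    · rw [pvALoop, if_neg (by simp), if_pos (by simp [hd]), if_pos (by simp)]
      simp only [List.takeWhile_cons, hd, Bool.false_eq_true, if_false]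
      rw [if_neg (by simp)]
      simp

theorem pvALoop_eq_ref (cs : List Char) : ∀ (i : Int), pvALoop cs i [] = pvRef cs i := by
  induction cs with
  | nil => intro i; simp [pvALoop, pvRef]
  | cons c rest ih =>
    intro i
    by_cases hp : (c == '-' || PySem.Chars.isdigit c) = true
    · rw [pvRef, if_pos hp]
      have step : pvALoop (c :: rest) i [] = pvALoop rest (i + 1) [c] := by
        by_cases hm : c = '-'
        · rw [pvALoop, if_pos (by simp [hm])]; simp
        · have hd : PySem.Chars.isdigit c = true := by
            rcases Bool.or_eq_true_iff.mp hp with h | h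
            · exact absurd (by simpa using h) hm
            · exact h
          rw [pvALoop, if_neg (by simp [hm]), if_neg (by simp [hd])]; simp
      rw [step, pvALoop_phase2 rest (i + 1) [c] (by simp)]
      by_cases hlen : (rest.takeWhile PySem.Chars.isdigit).length = rest.length
      · rw [if_pos hlen, if_pos (by simp only [List.length_cons]; omega)]
        simp
      · rw [if_neg hlen, if_neg (by simp only [List.length_cons]; omega)]
        simp only [List.singleton_append]
        congr 1
        ring
    · have hm : ¬ (c = '-') := by intro h; subst h; simp at hp
      have hd : PySem.Chars.isdigit c = false := by
        cases hD : PySem.Chars.isdigit c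
        · rfl
        · exact absurd (by simp [hD]) hp
      rw [pvALoop, if_neg (by simp [hm]), if_pos (by simp [hd]), if_neg (by simp)]
      rw [pvRef, if_neg (by simp [hm, hd])]
      exact ih (i + 1)

theorem pvFindStart_spec (cs : List Char) : ∀ (k : Nat),
    pvFindStart cs k = k + (cs.takeWhile (fun c => !(c == '-' || PySem.Chars.isdigit c))).length := by
  induction cs with
  | nil => intro k; simp [pvFindStart]
  | cons c rest ih =>
    intro k
    by_cases hp : (c == '-' || PySem.Chars.isdigit c) = true
    · have hq0 : (!(c == '-' || PySem.Chars.isdigit c)) = false := by rw [hp]; rfl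
      rw [pvFindStart, if_pos hp]
      simp only [List.takeWhile_cons, hq0, Bool.false_eq_true, if_false, List.length_nil]
      omega
    · have hp' : (c == '-' || PySem.Chars.isdigit c) = false := by
        cases hB : (c == '-' || PySem.Chars.isdigit c)
        · rfl
        · exact absurd hB hp
      have hq1 : (!(c == '-' || PySem.Chars.isdigit c)) = true := by rw [hp']; rfl
      rw [pvFindStart, if_neg hp, ih (k + 1)]
      simp only [List.takeWhile_cons, hq1, if_true, List.length_cons]
      omega

theorem pvFindEnd_spec (cs : List Char) : ∀ (k : Nat),
    pvFindEnd cs k = k + (cs.takeWhile PySem.Chars.isdigit).length := by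
  induction cs with
  | nil => intro k; simp [pvFindEnd]
  | cons c rest ih =>
    intro k
    by_cases hd : PySem.Chars.isdigit c = true
    · rw [pvFindEnd, if_pos hd, ih (k + 1)]
      simp only [List.takeWhile_cons, hd, if_true, List.length_cons]
      omega
    · rw [pvFindEnd, if_neg hd]
      have hd' : PySem.Chars.isdigit c = false := by cases hB : PySem.Chars.isdigit c; rfl; exact absurd hB hd
      simp only [List.takeWhile_cons, hd', Bool.false_eq_true, if_false, List.length_nil]
      omega

-- pvRef ignores a prefix of non-start characters
theorem pvRef_append_skip (w : List Char) :
    ∀ (t : List Char) (i : Int), (∀ c ∈ w, (c == '-' || PySem.Chars.isdigit c) = false) →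
    pvRef (w ++ t) i = pvRef t (i + w.length) := by
  induction w with
  | nil => intro t i _; simp
  | cons c w ih =>
    intro t i hw
    have hc := hw c (by simp)
    rw [List.cons_append, pvRef, if_neg (by simp [hc])]
    rw [ih t (i + 1) (fun c hc => hw c (by simp [hc]))]
    simp only [List.length_cons]
    congr 1; push_cast; ring

theorem pvB_eq_ref (line : String) : get_next_numeric_param_alt line = pvRef line.toList 0 := by
  unfold get_next_numeric_param_alt
  set cs := line.toList with hcs
  set q : Char → Bool := fun c => !(c == '-' || PySem.Chars.isdigit c) with hq
  have hsplit : cs = cs.takeWhile q ++ cs.dropWhile q := (List.takeWhile_append_dropWhile).symm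
  set w := cs.takeWhile q with hw
  set t := cs.dropWhile q with ht
  have hwmem : ∀ c ∈ w, (c == '-' || PySem.Chars.isdigit c) = false := by
    intro c hc
    have := List.mem_takeWhile_imp (hw ▸ hc)
    simpa [hq] using this
  have hstart : pvFindStart cs 0 = w.length := by
    rw [pvFindStart_spec cs 0]; simp [hq, hw]
  cases htc : t with
  | nil =>
    have hlen : cs.length = w.length := by
      conv_lhs => rw [hsplit]
      simp [htc]
    rw [if_pos (by rw [hstart, hlen])]
    have : pvRef cs 0 = pvRef t (0 + w.length) := by
      conv_lhs => rw [hsplit]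
      exact pvRef_append_skip w t 0 hwmem
    rw [this, htc]; simp [pvRef]
  | cons c rest =>
    have hpc : (c == '-' || PySem.Chars.isdigit c) = true := by
      have h0 := List.head?_dropWhile_not q cs
      rw [← ht, htc] at h0
      simp only [List.head?_cons, hq] at h0
      have h1 : ¬c = '-' → PySem.Chars.isdigit c = true := by simpa using h0
      by_cases hm : c = '-' <;> simp [hm, h1]
    have hlen : cs.length = w.length + 1 + rest.length := by
      conv_lhs => rw [hsplit]
      simp [htc]; omega
    rw [if_neg (by rw [hstart]; omega)]
    have hdrop : cs.drop (pvFindStart cs 0 + 1) = rest := by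
      rw [hstart]
      conv_lhs => rw [hsplit, htc]
      rw [show w.length + 1 = (w ++ [c]).length by simp]
      rw [show w ++ (c :: rest) = (w ++ [c]) ++ rest by simp]
      exact List.drop_left
    rw [hdrop]
    simp only [hstart]
    have hend : pvFindEnd rest (w.length + 1)
        = w.length + 1 + (rest.takeWhile PySem.Chars.isdigit).length := by
      rw [pvFindEnd_spec]
    have hdrop0 : cs.drop w.length = c :: rest := by
      conv_lhs => rw [hsplit, htc]
      exact List.drop_left
    have hslice : PySem.List.slice cs (some ((w.length : Nat) : Int))
        (some ((w.length + 1 + (rest.takeWhile PySem.Chars.isdigit).length : Nat) : Int))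
        = c :: rest.takeWhile PySem.Chars.isdigit := by
      rw [PySem.List.slice_natCast, hdrop0]
      rw [show w.length + 1 + (rest.takeWhile PySem.Chars.isdigit).length - w.length
            = (rest.takeWhile PySem.Chars.isdigit).length + 1 by omega]
      rw [List.take_succ_cons]
      congr 1
      exact (List.prefix_iff_eq_take.mp (List.takeWhile_prefix _)).symm
    have hrefr : pvRef cs 0 = pvRef t ((w.length : Int)) := by
      conv_lhs => rw [hsplit]
      have := pvRef_append_skip w t 0 hwmem
      rw [this]; norm_num
    simp only [hend, hslice, hrefr, htc]
    rw [pvRef, if_pos hpc]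
    by_cases heq : 1 + (rest.takeWhile PySem.Chars.isdigit).length = (c :: rest).length
    · have hEn : w.length + 1 + (rest.takeWhile PySem.Chars.isdigit).length = cs.length := by
        rw [hlen]; simp only [List.length_cons] at heq; omega
      rw [if_pos heq]
      cases hof : PySem.Int.ofChars? (c :: rest.takeWhile PySem.Chars.isdigit)
      · simp [pvIntOf, hof]
      · simp [pvIntOf, hof, hEn]
    · have hEn : ¬ (w.length + 1 + (rest.takeWhile PySem.Chars.isdigit).length = cs.length) := by
        rw [hlen]; simp only [List.length_cons] at heq ⊢; omega
      rw [if_neg heq]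
      cases hof : PySem.Int.ofChars? (c :: rest.takeWhile PySem.Chars.isdigit)
      · simp [pvIntOf, hof]
      · simp only [pvIntOf, hof, if_neg hEn]
        refine Prod.ext rfl ?_
        push_cast; ring

-- ===== VERDICT (by name: the statement is the Claim_ definition above) =====
theorem get_next_numeric_param_spec : Claim_equal_get_next_numeric_param := by
  intro line _ _
  unfold Spec_get_next_numeric_param get_next_numeric_param
  rw [pvB_eq_ref, pvALoop_eq_ref]
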